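-- pv_equiv track=rewrite | github.com/pypi-data/pypi-mirror-399 | packages/aa-bb/aa_bb-3.2.5-py3-none-any.whl/aa_bb/checks_cb/sus_trans.py | is_excluded_system
-- ===== SOURCE A (Python) =====
-- def is_excluded_system(tx: dict, excluded_str: str) -> bool:
--     if not excluded_str:
--         return False
--     system_id = tx.get("system_id")
--     if not system_id:
--         return False
--     excluded_ids = {int(s.strip()) for s in excluded_str.split(",") if s.strip().isdigit()}
--     return int(system_id) in excluded_ids
-- ===== SOURCE B (Python) =====
-- def is_excluded_system(tx: dict, excluded_str: str) -> bool:
--     if not excluded_str: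
--         return False
--     system_id = tx.get("system_id")
--     if not system_id:
--         return False
--     target = int(system_id)
--     # single fused pass: a character-level scanner that tokenizes at ',' on the
--     # fly (sentinel comma flushes the final token) and tests each token as it
--     # completes -- no split(), no set, nothing retained between tokens.
--     cur = []
--     for c in excluded_str + ",":
--         if c == ',':
--             t = "".join(cur).strip()
--             if t.isdigit() and int(t) == target:
--                 return True
--             cur = []
--         else:
--             cur.append(c)
--     return False
-- ===== Notes on version B (the rewrite author's own statement) =====
-- stated objective: alternative
-- what changed: Replaces A's staged pipeline (split into a token list, build a set of parsed ids, then a membership test) with a single fused character-level scanner that tokenizes at commas on the fly and early-exits as soon as a completed token matches, maintaining no token list and no set.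
import Mathlib
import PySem

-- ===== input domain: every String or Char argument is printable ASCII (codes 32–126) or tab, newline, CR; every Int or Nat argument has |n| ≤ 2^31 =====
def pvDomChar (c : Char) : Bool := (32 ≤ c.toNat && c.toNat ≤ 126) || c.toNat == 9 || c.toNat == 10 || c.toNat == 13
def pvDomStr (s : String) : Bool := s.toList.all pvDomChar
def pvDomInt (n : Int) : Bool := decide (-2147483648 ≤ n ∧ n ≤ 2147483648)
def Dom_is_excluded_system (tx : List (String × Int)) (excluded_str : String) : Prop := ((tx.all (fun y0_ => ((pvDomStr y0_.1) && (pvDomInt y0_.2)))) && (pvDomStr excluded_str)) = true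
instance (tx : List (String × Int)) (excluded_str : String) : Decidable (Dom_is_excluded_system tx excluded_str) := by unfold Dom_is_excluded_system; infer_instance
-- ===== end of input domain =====

-- B replaces A's staged pipeline (split into tokens, build a set of parsed ids, membership
-- test) with one fused character-level scanner that tokenizes at commas on the fly and tests
-- each token as it completes, maintaining no token list and no set (objective: alternative).

-- ===== PORT A =====
def is_excluded_system (tx : List (String × Int)) (excluded_str : String) : Bool :=
  if excluded_str = "" then false
  else
    match PySem.Dict.get? (PySem.Dict.mk tx) "system_id" with
    | none => false
    | some system_id =>
      if system_id = 0 then false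
      else
        -- {int(s.strip()) for s in excluded_str.split(",") if s.strip().isdigit()}
        let excluded_ids : PySem.Set Int :=
          PySem.Set.ofList ((((PySem.Str.split? excluded_str ",").getD [])).filterMap (fun s =>
            if PySem.Str.strIsdigit (PySem.Str.strip s) then
              PySem.Int.ofStr? (PySem.Str.strip s)   -- some: the token is all digits
            else none))
        PySem.Set.contains excluded_ids system_id

-- ===== PORT B =====
-- test of a completed token, as in Source B's loop body at a flush:
-- t = "".join(cur).strip(); t.isdigit() and int(t) == target
def pvFlushTest (target : Int) (cur : List Char) : Bool :=
  let t := PySem.Chars.strip cur.reverse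
  PySem.Chars.strIsdigit t && (PySem.Int.ofChars? t == some target)

-- the scanner loop of Source B: `cur` holds the current token's characters in reverse
-- (appending to a list), `,` flushes; early return True modelled by `||`.
def pvScan (target : Int) : List Char → List Char → Bool
  | [], _ => false
  | c :: rest, cur =>
    if c = ',' then pvFlushTest target cur || pvScan target rest []
    else pvScan target rest (c :: cur)

def is_excluded_system_alt (tx : List (String × Int)) (excluded_str : String) : Bool :=
  if excluded_str = "" then false
  else
    match PySem.Dict.get? (PySem.Dict.mk tx) "system_id" with
    | none => false
    | some system_id =>
      if system_id = 0 then false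
      else
        -- for c in excluded_str + ",": …
        pvScan system_id (excluded_str.toList ++ [',']) []

-- ===== PRECONDITION & SPEC =====
def Spec_is_excluded_system (tx : List (String × Int)) (excluded_str : String) (out : Bool) : Prop := out = is_excluded_system_alt tx excluded_str
instance (tx : List (String × Int)) (excluded_str : String) (out : Bool) : Decidable (Spec_is_excluded_system tx excluded_str out) := by unfold Spec_is_excluded_system; infer_instance

-- ===== CLAIM (what is proved, stated in full; the proofs are below) =====
def Claim_equal_is_excluded_system : Prop := ∀ (tx : List (String × Int)) (excluded_str : String), Dom_is_excluded_system tx excluded_str → Spec_is_excluded_system tx excluded_str (is_excluded_system tx excluded_str)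

-- ===== LEMMAS AND PROOFS =====

-- reference splitter: comma-splitting with an explicit "token so far" prefix
def pvSplitC (pre : List Char) : List Char → List (List Char)
  | [] => [pre]
  | c :: r => if c = ',' then pre :: pvSplitC [] r else pvSplitC (pre ++ [c]) r

lemma pvSplitOn_go_eq (l : List Char) : ∀ (fuel : Nat) (cur : List Char)
    (acc : List (List Char)), l.length < fuel →
    PySem.Chars.splitOn.go [','] fuel l cur acc = acc.reverse ++ pvSplitC cur.reverse l := by
  induction l with
  | nil =>
    intro fuel cur acc hf
    match fuel, hf with
    | f + 1, _ => simp [PySem.Chars.splitOn.go, pvSplitC]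
  | cons c rest ih =>
    intro fuel cur acc hf
    match fuel, hf with
    | f + 1, hf =>
      by_cases hc : c = ','
      · subst hc
        rw [show PySem.Chars.splitOn.go [','] (f+1) (',' :: rest) cur acc
            = PySem.Chars.splitOn.go [','] f rest [] (cur.reverse :: acc) by
          simp [PySem.Chars.splitOn.go]]
        rw [ih f [] (cur.reverse :: acc) (by simpa using hf)]
        simp [pvSplitC]
      · rw [show PySem.Chars.splitOn.go [','] (f+1) (c :: rest) cur acc
            = PySem.Chars.splitOn.go [','] f rest (c :: cur) acc by
          simp only [PySem.Chars.splitOn.go, List.isPrefixOf]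
          simp
          exact fun hh => absurd hh.symm hc]
        rw [ih f (c :: cur) acc (by simpa using hf)]
        simp [pvSplitC, hc]

lemma pvSplitOn_eq (l : List Char) :
    PySem.Chars.splitOn l [','] = pvSplitC [] l := by
  unfold PySem.Chars.splitOn
  rw [pvSplitOn_go_eq l (l.length + 1) [] [] (by omega)]
  simp

lemma pvScan_eq (target : Int) (cs : List Char) : ∀ (cur : List Char),
    pvScan target (cs ++ [',']) cur
      = (pvSplitC cur.reverse cs).any (fun t => pvFlushTest target t.reverse) := by
  induction cs with
  | nil =>
    intro cur
    simp [pvScan, pvSplitC]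
  | cons c rest ih =>
    intro cur
    by_cases hc : c = ','
    · subst hc
      simp only [List.cons_append, pvScan, pvSplitC]
      rw [ih []]
      simp
    · simp only [List.cons_append, pvScan, pvSplitC, if_neg hc]
      rw [ih (c :: cur)]
      simp

lemma pvFlushTest_reverse (target : Int) (t : List Char) :
    pvFlushTest target t.reverse
      = (PySem.Chars.strIsdigit (PySem.Chars.strip t)
          && (PySem.Int.ofChars? (PySem.Chars.strip t) == some target)) := by
  simp [pvFlushTest]

-- ===== VERDICT (by name: the statement is the Claim_ definition above) =====
theorem is_excluded_system_spec : Claim_equal_is_excluded_system := by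
  intro tx excluded_str _
  unfold Spec_is_excluded_system is_excluded_system is_excluded_system_alt
  split_ifs with h
  · rfl
  · cases PySem.Dict.get? (PySem.Dict.mk tx) "system_id" with
    | none => rfl
    | some sid =>
      simp only
      split_ifs with h0
      · rfl
      · rw [pvScan_eq sid excluded_str.toList []]
        rw [Bool.eq_iff_iff]
        have hsplit : (PySem.Str.split? excluded_str ",").getD []
            = (pvSplitC [] excluded_str.toList).map String.ofList := by
          simp [PySem.Str.split?, PySem.Chars.split?, pvSplitOn_eq]
        rw [hsplit]
        simp only [List.reverse_nil, PySem.Set.contains_iff, PySem.Set.mem_ofList,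
          List.filterMap_map, List.mem_filterMap, List.any_eq_true, Function.comp,
          pvFlushTest_reverse, Bool.and_eq_true, beq_iff_eq]
        constructor
        · rintro ⟨t, ht, hf⟩
          rw [Option.ite_none_right_eq_some] at hf
          refine ⟨t, ht, ?_, ?_⟩
          · simpa [PySem.Str.strip] using hf.1
          · have := hf.2
            simp only [PySem.Int.ofStr?] at this
            simpa [PySem.Str.strip] using this
        · rintro ⟨t, ht, hd, hv⟩
          refine ⟨t, ht, ?_⟩
          rw [Option.ite_none_right_eq_some]
          constructor
          · simpa [PySem.Str.strip] using hd
          · simp only [PySem.Int.ofStr?]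
            simpa [PySem.Str.strip] using hv
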